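-- pv_equiv track=rewrite | github.com/sh1n-k/KeystrokeSimulator | keystroke_processor.py | _select_by_group_priority
-- ===== SOURCE A (Python) =====
-- from typing import List, Dict, Optional, Any, Set, Tuple
--
-- def _select_by_group_priority(events: List[Dict]) -> List[Dict]:
--     """그룹별 우선순위로 이벤트 선택"""
--     groups = {}
--     no_group = []
--
--     for evt in events:
--         if evt["group"]:
--             groups.setdefault(evt["group"], []).append(evt)
--         else:
--             no_group.append(evt)
--
--     # 각 그룹에서 최고 우선순위 이벤트만 선택
--     final_events = [
--         min(grp_evts, key=lambda e: e["priority"]) for grp_evts in groups.values()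
--     ]
--     final_events.extend(no_group)
--
--     return final_events
-- ===== SOURCE B (Python) =====
-- def _select_by_group_priority(events):
--     """Two staged passes, no dict: record first-appearance group order, then argmin-scan per group."""
--     seen = []
--     no_group = []
--     for evt in events:
--         g = evt["group"]
--         if not g:
--             no_group.append(evt)
--         elif g not in seen:
--             seen.append(g)
--     result = []
--     for g in seen:
--         best = None
--         for evt in events:
--             if evt["group"] == g and (best is None or evt["priority"] < best["priority"]):
--                 best = evt
--         result.append(best)
--     return result + no_group
-- ===== Notes on version B (the rewrite author's own statement) =====
-- stated objective: alternative
-- what changed: A builds a dict of full per-group event lists and then runs min over each group; B uses no dict at all: one pass records the first-appearance order of groups and the ungrouped events, then a per-group argmin scan over the event list picks each group's lowest-priority event (strict < so the first event wins ties, like min).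
import Mathlib
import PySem

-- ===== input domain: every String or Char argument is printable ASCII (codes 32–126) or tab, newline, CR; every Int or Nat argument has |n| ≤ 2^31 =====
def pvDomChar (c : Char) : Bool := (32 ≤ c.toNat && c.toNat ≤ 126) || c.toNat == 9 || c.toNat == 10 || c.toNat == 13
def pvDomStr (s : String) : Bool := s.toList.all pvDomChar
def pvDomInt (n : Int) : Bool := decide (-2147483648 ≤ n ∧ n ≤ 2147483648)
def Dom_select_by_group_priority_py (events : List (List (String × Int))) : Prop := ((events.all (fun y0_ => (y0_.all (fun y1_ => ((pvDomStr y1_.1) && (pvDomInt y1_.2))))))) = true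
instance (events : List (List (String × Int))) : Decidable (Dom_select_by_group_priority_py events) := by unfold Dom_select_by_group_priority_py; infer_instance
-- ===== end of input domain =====

-- B replaces A's per-group event lists + min pass by two staged passes without a dict:
-- first collect the first-appearance order of groups, then argmin-scan the event list per group.

-- shared helpers: dict lookups on an event (first match, like Python's dict); total forms, exact under Pre_
def pvGroupOf (e : List (String × Int)) : Int := (List.lookup "group" e).getD 0
def pvKey (e : List (String × Int)) : Int := (List.lookup "priority" e).getD 0

-- ===== PORT A =====
-- groups.setdefault(g, []).append(evt) is the PySem grouping idiom Dict.modify g [] (· ++ [evt])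
def pvStepA (st : PySem.Dict Int (List (List (String × Int))) × List (List (String × Int)))
    (evt : List (String × Int)) :
    PySem.Dict Int (List (List (String × Int))) × List (List (String × Int)) :=
  let g := pvGroupOf evt
  if g ≠ 0 then (st.1.modify g [] (· ++ [evt]), st.2) else (st.1, st.2 ++ [evt])

def select_by_group_priority_py (events : List (List (String × Int))) : List (List (String × Int)) :=
  let st := events.foldl pvStepA (PySem.Dict.empty, [])
  (st.1.values.map (fun grp => (PySem.List.min? grp pvKey).getD [])) ++ st.2

-- ===== PORT B =====
-- pass 1: 'seen' = groups in first-appearance order, 'no_group' list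
def pvScan (st : List Int × List (List (String × Int))) (evt : List (String × Int)) :
    List Int × List (List (String × Int)) :=
  let g := pvGroupOf evt
  if g = 0 then (st.1, st.2 ++ [evt])
  else if g ∈ st.1 then st else (st.1 ++ [g], st.2)

-- pass 2 (per group g): best = None; for evt in events: if evt["group"] == g and (best is None or
-- evt["priority"] < best["priority"]): best = evt
def pvBest (events : List (List (String × Int))) (g : Int) : Option (List (String × Int)) :=
  events.foldl (fun best evt =>
    if pvGroupOf evt = g then
      match best with
      | none => some evt
      | some b => if pvKey evt < pvKey b then some evt else best
    else best) none

def select_by_group_priority_py_alt (events : List (List (String × Int))) : List (List (String × Int)) :=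
  let st := events.foldl pvScan ([], [])
  (st.1.map (fun g => (pvBest events g).getD [])) ++ st.2
  -- .getD [] : Python appends `best`, which is never None since g was seen in pass 1

-- ===== PRECONDITION & SPEC =====
-- Pre_ excludes exactly the KeyError inputs: every event must have a "group" key, and every
-- grouped event (group value ≠ 0) must also have a "priority" key (min's key touches each one).
def Pre_select_by_group_priority_py (events : List (List (String × Int))) : Prop :=
  (events.all (fun evt => (List.lookup "group" evt).isSome &&
      ((List.lookup "group" evt == some 0) || (List.lookup "priority" evt).isSome))) = true
instance (events : List (List (String × Int))) : Decidable (Pre_select_by_group_priority_py events) := by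
  unfold Pre_select_by_group_priority_py; infer_instance

def pvWitness_select_by_group_priority_py : (List (List (String × Int))) :=
  [[("group", 1), ("priority", 2)], [("group", 0)], [("group", 1), ("priority", 1)]]

def Spec_select_by_group_priority_py (events : List (List (String × Int))) (out : List (List (String × Int))) : Prop := out = select_by_group_priority_py_alt events
instance (events : List (List (String × Int))) (out : List (List (String × Int))) : Decidable (Spec_select_by_group_priority_py events out) := by unfold Spec_select_by_group_priority_py; infer_instance

-- ===== CLAIM (what is proved, stated in full; the proofs are below) =====
def Claim_equal_select_by_group_priority_py : Prop := ∀ (events : List (List (String × Int))), Dom_select_by_group_priority_py events → Pre_select_by_group_priority_py events → Spec_select_by_group_priority_py events (select_by_group_priority_py events)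

-- ===== LEMMAS AND PROOFS =====

-- invariant after processing a prefix p: A's dict and B's (seen, no_group) are tied together,
-- and every dict entry is exactly the filter of p by its group key
def pvInv (p : List (List (String × Int)))
    (s1 : PySem.Dict Int (List (List (String × Int))) × List (List (String × Int)))
    (s2 : List Int × List (List (String × Int))) : Prop :=
  s1.2 = s2.2 ∧
  s1.1.items.map (·.1) = s2.1 ∧
  (∀ q ∈ s1.1.items, q.1 ≠ 0 ∧ q.2 = p.filter (fun e => pvGroupOf e = q.1)) ∧
  (∀ e ∈ p, pvGroupOf e ≠ 0 → pvGroupOf e ∈ s2.1)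

lemma pv_inv_step (p : List (List (String × Int)))
    (s1 : PySem.Dict Int (List (List (String × Int))) × List (List (String × Int)))
    (s2 : List Int × List (List (String × Int)))
    (evt : List (String × Int)) (h : pvInv p s1 s2) :
    pvInv (p ++ [evt]) (pvStepA s1 evt) (pvScan s2 evt) := by
  obtain ⟨hng, hkeys, hent, hseen⟩ := h
  by_cases hg : pvGroupOf evt = 0
  · refine ⟨by simp [pvStepA, pvScan, hg, hng], by simpa [pvStepA, pvScan, hg] using hkeys, ?_, ?_⟩
    · intro q hq
      have hq' := hent q (by simpa [pvStepA, hg] using hq)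
      refine ⟨hq'.1, ?_⟩
      rw [List.filter_append, List.filter_singleton]
      simp [hg, Ne.symm hq'.1, hq'.2]
    · intro e he hge
      rcases List.mem_append.mp he with h1 | h2
      · simpa [pvScan, hg] using hseen e h1 hge
      · simp at h2; rw [h2] at hge; exact absurd hg hge
  · by_cases hs : pvGroupOf evt ∈ s2.1
    · -- group already seen: B's state is unchanged, A updates the entry in place
      have hmem : pvGroupOf evt ∈ s1.1.items.map (·.1) := by rw [hkeys]; exact hs
      cases hc : List.find? (fun q => q.1 == pvGroupOf evt) s1.1.items with
      | none =>
        exfalso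
        obtain ⟨q, hq, hq1⟩ := List.mem_map.mp hmem
        exact (List.find?_eq_none.mp hc q hq) (by simp [hq1])
      | some q =>
        have hq1 : q.1 = pvGroupOf evt := eq_of_beq (by simpa using List.find?_some hc)
        have hqmem : q ∈ s1.1.items := List.mem_of_find?_eq_some hc
        have hget1 : s1.1.get? (pvGroupOf evt) = some q.2 := by simp [PySem.Dict.get?, hc]
        have hcont1 : s1.1.contains (pvGroupOf evt) = true := by
          cases hc1 : s1.1.contains (pvGroupOf evt)
          · have := (PySem.Dict.get?_eq_none_iff_contains s1.1 (pvGroupOf evt)).mpr hc1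
            simp [hget1] at this
          · rfl
        have hstepA : (pvStepA s1 evt).1.items =
            s1.1.items.map (fun r => if (r.1 == pvGroupOf evt) = true
              then (pvGroupOf evt, q.2 ++ [evt]) else r) := by
          simp [pvStepA, hg, PySem.Dict.modify, PySem.Dict.getD_eq_get?_getD, hget1,
            PySem.Dict.insert, hcont1]
        refine ⟨by simp [pvStepA, pvScan, hg, hs, hng], ?_, ?_, ?_⟩
        · rw [hstepA, List.map_map]
          have : ((fun r : Int × List (List (String × Int)) => r.1) ∘
              (fun r => if (r.1 == pvGroupOf evt) = true
                then (pvGroupOf evt, q.2 ++ [evt]) else r)) = (·.1) := by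
            funext r
            by_cases hr : r.1 = pvGroupOf evt
            · simp [Function.comp, hr]
            · simp [Function.comp, hr]
          rw [this, hkeys]
          simp [pvScan, hg, hs]
        · rw [hstepA]
          intro r hr
          obtain ⟨r0, hr0, hr0e⟩ := List.mem_map.mp hr
          obtain ⟨hr0ne, hr0f⟩ := hent r0 hr0
          by_cases hrg : r0.1 = pvGroupOf evt
          · simp only [hrg, beq_self_eq_true, if_pos] at hr0e
            subst hr0e
            refine ⟨hg, ?_⟩
            have hq2 := (hent q hqmem).2
            rw [List.filter_append, List.filter_singleton]
            simp [hq2, hq1]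
          · simp only [beq_iff_eq, hrg, if_false] at hr0e
            subst hr0e
            refine ⟨hr0ne, ?_⟩
            have hne' : ¬ pvGroupOf evt = r0.1 := fun h => hrg h.symm
            rw [List.filter_append, List.filter_singleton]
            simp [hne', hr0f]
        · intro e he hge
          rcases List.mem_append.mp he with h1 | h2
          · simpa [pvScan, hg, hs] using hseen e h1 hge
          · simp at h2; subst h2; simp [pvScan, hg, hs]
    · -- new group: both sides append a fresh entry
      have hnotmem : ∀ q ∈ s1.1.items, ¬ q.1 = pvGroupOf evt := by
        intro q hq hqe
        exact hs (by rw [← hkeys]; exact List.mem_map.mpr ⟨q, hq, hqe⟩)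
      have hfind : List.find? (fun q => q.1 == pvGroupOf evt) s1.1.items = none :=
        List.find?_eq_none.mpr (fun q hq => by simpa using hnotmem q hq)
      have hget1 : s1.1.get? (pvGroupOf evt) = none := by
        simp [PySem.Dict.get?, hfind]
      have hcont1 : s1.1.contains (pvGroupOf evt) = false :=
        (PySem.Dict.get?_eq_none_iff_contains _ _).mp hget1
      have hstepA : (pvStepA s1 evt).1.items = s1.1.items ++ [(pvGroupOf evt, [evt])] := by
        simp [pvStepA, hg, PySem.Dict.modify, PySem.Dict.getD_eq_get?_getD, hget1,
          PySem.Dict.insert, hcont1]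
      have hfiltp : p.filter (fun e => pvGroupOf e = pvGroupOf evt) = [] := by
        rw [List.filter_eq_nil_iff]
        intro e he
        simp only [decide_eq_true_eq]
        intro hee
        exact hs (hee ▸ hseen e he (hee ▸ hg))
      refine ⟨by simp [pvStepA, pvScan, hg, hs, hng], ?_, ?_, ?_⟩
      · rw [hstepA, List.map_append, hkeys]
        simp [pvScan, hg, hs]
      · rw [hstepA]
        intro q hq
        rcases List.mem_append.mp hq with h1 | h2
        · obtain ⟨hne, hf⟩ := hent q h1
          refine ⟨hne, ?_⟩
          have hne' : ¬ pvGroupOf evt = q.1 := fun h => hnotmem q h1 h.symm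
          rw [List.filter_append, List.filter_singleton]
          simp [hne', hf]
        · simp at h2
          subst h2
          refine ⟨hg, ?_⟩
          rw [List.filter_append, List.filter_singleton]
          simp [hfiltp]
      · intro e he hge
        rcases List.mem_append.mp he with h1 | h2
        · have := hseen e h1 hge
          simp [pvScan, hg, hs]
          exact Or.inl this
        · simp at h2; subst h2
          simp [pvScan, hg, hs]

lemma pv_inv_fold (p : List (List (String × Int))) :
    pvInv p (p.foldl pvStepA (PySem.Dict.empty, [])) (p.foldl pvScan ([], [])) := by
  induction p using List.reverseRecOn with
  | nil =>
    refine ⟨rfl, by simp [PySem.Dict.empty], ?_, by simp⟩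
    intro q hq
    simp [PySem.Dict.empty] at hq
  | append_singleton l e ih =>
    rw [List.foldl_append, List.foldl_append]
    exact pv_inv_step l _ _ e ih

-- the per-group argmin scan over all events equals min? over the group's filtered sublist
lemma pvBest_aux (g : Int) (l : List (List (String × Int))) (b : Option (List (String × Int))) :
    l.foldl (fun best evt =>
      if pvGroupOf evt = g then
        match best with
        | none => some evt
        | some bb => if pvKey evt < pvKey bb then some evt else best
      else best) b
    = (l.filter (fun e => pvGroupOf e = g)).foldl (fun acc x =>
        match acc with
        | none => some x
        | some m => if pvKey x < pvKey m then some x else some m) b := by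
  induction l generalizing b with
  | nil => rfl
  | cons e t ih =>
    by_cases he : pvGroupOf e = g
    · rw [List.filter_cons_of_pos (by simpa using he)]
      simp only [List.foldl_cons, he, if_pos]
      rw [ih]
      congr 1
      cases b with
      | none => rfl
      | some m => by_cases hlt : pvKey e < pvKey m <;> simp [hlt]
    · rw [List.filter_cons_of_neg (by simpa using he)]
      simp only [List.foldl_cons, he, if_false]
      exact ih b

lemma pvBest_eq_min_filter (events : List (List (String × Int))) (g : Int) :
    pvBest events g = PySem.List.min? (events.filter (fun e => pvGroupOf e = g)) pvKey := by
  unfold pvBest PySem.List.min?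
  have h := pvBest_aux g events none
  convert h using 2
  funext acc x
  cases acc <;> rfl

-- ===== VERDICT (by name: the statement is the Claim_ definition above) =====
theorem select_by_group_priority_py_spec : Claim_equal_select_by_group_priority_py := by
  intro events _ _
  unfold Spec_select_by_group_priority_py select_by_group_priority_py select_by_group_priority_py_alt
  obtain ⟨hng, hkeys, hent, _⟩ := pv_inv_fold events
  dsimp only
  rw [hng]
  congr 1
  rw [PySem.Dict.values, List.map_map]
  have hstep : ∀ q ∈ (events.foldl pvStepA (PySem.Dict.empty, [])).1.items,
      (((fun grp => (PySem.List.min? grp pvKey).getD []) ∘ (·.2)) q)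
        = ((fun g => (pvBest events g).getD []) ∘ (·.1)) q := by
    intro q hq
    simp only [Function.comp]
    rw [(hent q hq).2, pvBest_eq_min_filter]
  rw [List.map_congr_left hstep, ← List.map_map, hkeys]
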